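-- pv_equiv track=rewrite | github.com/Prit-Pathak/Python-DSA | CODE-AND-DEBUG/11.String_ASCII/Assignment/q2.py | is_upper
-- ===== SOURCE A (Python) =====
-- def is_upper(my_str: str) -> str:
--     upper_str = ""
--     for ch in my_str:
--         if "a" <= ch <= "z":
--             upper_str += chr(ord(ch) - 32)
--         else:
--             upper_str += ch
--     return upper_str
-- ===== SOURCE B (Python) =====
-- _TABLE = str.maketrans('abcdefghijklmnopqrstuvwxyz', 'ABCDEFGHIJKLMNOPQRSTUVWXYZ')
--
--
-- def is_upper(my_str: str) -> str:
--     return my_str.translate(_TABLE)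
-- ===== Notes on version B (the rewrite author's own statement) =====
-- stated objective: idiomatic
-- what changed: Replaces the explicit per-character loop with if/else and repeated string concatenation by a precomputed 26-entry translation table applied in a single str.translate call.
import Mathlib
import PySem

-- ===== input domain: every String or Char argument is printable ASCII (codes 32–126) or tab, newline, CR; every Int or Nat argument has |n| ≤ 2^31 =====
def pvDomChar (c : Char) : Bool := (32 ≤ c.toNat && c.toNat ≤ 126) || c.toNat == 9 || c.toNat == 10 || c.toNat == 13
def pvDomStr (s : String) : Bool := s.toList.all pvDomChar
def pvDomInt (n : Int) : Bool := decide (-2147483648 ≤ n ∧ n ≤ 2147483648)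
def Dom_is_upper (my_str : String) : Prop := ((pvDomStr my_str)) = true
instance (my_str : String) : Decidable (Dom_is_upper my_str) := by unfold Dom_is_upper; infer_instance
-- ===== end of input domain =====

-- B replaces A's per-character if/else loop with string concatenation by a fixed
-- 26-entry lowercase→uppercase translation table applied in one translate pass (idiomatic).

-- ===== PORT A =====
-- A: scan the string, appending chr(ord(ch)-32) for 'a'<=ch<='z', else ch itself.
def is_upper (my_str : String) : String :=
  String.mk (my_str.toList.foldl
    (fun upper_str ch =>
      if 'a' ≤ ch ∧ ch ≤ 'z' then upper_str ++ [Char.ofNat (ch.toNat - 32)]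
      else upper_str ++ [ch])
    [])

-- ===== PORT B =====
-- B: str.maketrans('abc…z', 'ABC…Z') as an association table, applied by a single
-- translate pass (each character replaced by its table entry, defaulting to itself).
def pvLowers : List Char :=
  ['a','b','c','d','e','f','g','h','i','j','k','l','m','n','o','p','q','r','s','t','u','v','w','x','y','z']
def pvUppers : List Char :=
  ['A','B','C','D','E','F','G','H','I','J','K','L','M','N','O','P','Q','R','S','T','U','V','W','X','Y','Z']
def pvTable : PySem.Dict Char Char := PySem.Dict.ofList (List.zip pvLowers pvUppers)

def is_upper_alt (my_str : String) : String :=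
  String.mk (my_str.toList.map (fun ch => pvTable.getD ch ch))

-- ===== PRECONDITION & SPEC =====
def Spec_is_upper (my_str : String) (out : String) : Prop := out = is_upper_alt my_str
instance (my_str : String) (out : String) : Decidable (Spec_is_upper my_str out) := by
  unfold Spec_is_upper; infer_instance

-- ===== CLAIM (what is proved, stated in full; the proofs are below) =====
def Claim_equal_is_upper : Prop := ∀ (my_str : String), Dom_is_upper my_str → Spec_is_upper my_str (is_upper my_str)

-- ===== LEMMAS AND PROOFS =====

-- the table sends each lowercase letter to its uppercase form …
theorem pvTable_lower (c : Char) (h : 'a' ≤ c ∧ c ≤ 'z') :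
    pvTable.getD c c = Char.ofNat (c.toNat - 32) := by
  obtain ⟨h1, h2⟩ := h
  have hn1 : 97 ≤ c.toNat := h1
  have hn2 : c.toNat ≤ 122 := h2
  have hc : c = Char.ofNat c.toNat := Eq.symm (Char.ofNat_toNat c)
  interval_cases h : c.toNat <;> (subst hc; decide)

-- … and leaves every other character unchanged
theorem pvTable_other (c : Char) (h : ¬ ('a' ≤ c ∧ c ≤ 'z')) :
    pvTable.getD c c = c := by
  apply PySem.Dict.getD_of_not_contains
  rw [PySem.Dict.contains_eq_decide_mem_keys]
  simp only [pvTable, pvLowers, pvUppers, decide_eq_false_iff_not]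
  intro hmem
  have h1 : ¬ (97 ≤ c.toNat ∧ c.toNat ≤ 122) := fun ⟨a, b⟩ => h ⟨a, b⟩
  fin_cases hmem <;> simp_all

-- ===== VERDICT (by name: the statement is the Claim_ definition above) =====
theorem is_upper_spec : Claim_equal_is_upper := by
  intro my_str _
  unfold Spec_is_upper is_upper is_upper_alt
  congr 1
  have hfn : (fun (upper_str : List Char) ch =>
      if 'a' ≤ ch ∧ ch ≤ 'z' then upper_str ++ [Char.ofNat (ch.toNat - 32)]
      else upper_str ++ [ch])
      = fun (upper_str : List Char) ch =>
        upper_str ++ [if 'a' ≤ ch ∧ ch ≤ 'z' then Char.ofNat (ch.toNat - 32) else ch] := by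
    funext upper_str ch; split_ifs <;> rfl
  rw [hfn, PySem.List.foldl_append_singleton_eq_map, List.nil_append]
  apply List.map_congr_left
  intro ch _
  by_cases h : 'a' ≤ ch ∧ ch ≤ 'z'
  · rw [if_pos h, pvTable_lower ch h]
  · rw [if_neg h, pvTable_other ch h]
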